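-- pv_equiv track=rewrite | github.com/storyscene/domino | domino.py | isGoodTrio
-- ===== SOURCE A (Python) =====
-- def isGoodTrio(indone, indtwo, indthree, lod):
--     tuplet = [lod[indone][1], lod[indone][2], lod[indtwo][1], lod[indtwo][2], lod[indthree][1], lod[indthree][2]]
--     tuplet = sorted(tuplet)
--     summy = sum(tuplet)
--
--     for i in range(1,7):
--         if tuplet.count(i) == 3:
--             if summy - 3*i == 5 or summy - 3*i >=14:
--                 return True
--             for j in range(i+1,7):
--                 if tuplet.count(j) == 3:
--                     return True
--         elif tuplet.count(i) == 4:
--             if summy == 5*i: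
--                 return True
--             return False
--         elif tuplet.count(i) >= 5:
--             return True
--     if tuplet in [[1,2,3,4,5,6], [1,1,2,2,3,3], [4,4,5,5,6,6]]:
--         return True
--     return False
-- ===== SOURCE B (Python) =====
-- def isGoodTrio(indone, indtwo, indthree, lod):
--     tup = sorted([lod[indone][1], lod[indone][2], lod[indtwo][1],
--                   lod[indtwo][2], lod[indthree][1], lod[indthree][2]])
--     s = sum(tup)
--     # one left-to-right pass: run-length encode the sorted pips
--     runs = []
--     for x in tup:
--         if runs and runs[-1][0] == x:
--             runs[-1][1] += 1
--         else:
--             runs.append([x, 1])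
--     big = [(v, k) for v, k in runs if k >= 3 and 1 <= v <= 6]
--     if len(big) == 2:
--         return True
--     if len(big) == 1:
--         v, k = big[0]
--         if k >= 5:
--             return True
--         if k == 4:
--             return s == 5 * v
--         return s - 3 * v == 5 or s - 3 * v >= 14
--     return runs in ([[1, 1], [2, 1], [3, 1], [4, 1], [5, 1], [6, 1]],
--                     [[1, 2], [2, 2], [3, 2]],
--                     [[4, 2], [5, 2], [6, 2]])
-- ===== Notes on version B (the rewrite author's own statement) =====
-- stated objective: alternative
-- what changed: A scans candidate values 1..6, re-counting the six pips with .count at each step and a nested inner scan for a second triple, ending with a membership test on three hardcoded sorted lists; B run-length-encodes the sorted six pips in one left-to-right pass and dispatches on the number of 'big' (length>=3, in-range) runs, and its fallback compares the run encoding itself against the run-encoded tables.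
import Mathlib
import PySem

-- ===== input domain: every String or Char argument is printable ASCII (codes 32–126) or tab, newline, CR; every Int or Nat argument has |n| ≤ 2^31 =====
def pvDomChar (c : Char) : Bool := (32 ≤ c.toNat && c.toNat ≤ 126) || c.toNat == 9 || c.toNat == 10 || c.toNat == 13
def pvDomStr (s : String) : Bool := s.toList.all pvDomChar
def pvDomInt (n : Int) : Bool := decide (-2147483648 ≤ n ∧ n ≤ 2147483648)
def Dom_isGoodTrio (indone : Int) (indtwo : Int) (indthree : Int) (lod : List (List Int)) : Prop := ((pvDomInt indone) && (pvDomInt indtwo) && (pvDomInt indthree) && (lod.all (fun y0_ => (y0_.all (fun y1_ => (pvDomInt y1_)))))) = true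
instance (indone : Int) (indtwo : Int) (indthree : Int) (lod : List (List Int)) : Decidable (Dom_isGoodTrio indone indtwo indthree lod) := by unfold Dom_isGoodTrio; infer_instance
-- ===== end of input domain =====

-- B replaces A's scan over candidate values 1..6 (repeated .count passes plus a nested
-- inner scan) by a single left-to-right run-length encoding of the sorted six pips,
-- dispatching on the number of big (length ≥ 3, in-range) runs; same return value everywhere.

-- ===== PORT A =====

-- the inner 'for j in range(i+1,7)' loop: some true = a 'return True' fired, none = fell through
def aInner (t : List Int) : List Int → Option Bool
  | [] => none
  | j :: rest => if PySem.List.count t j = 3 then some true else aInner t rest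

-- the outer 'for i in range(1,7)' loop
def aLoop (t : List Int) (s : Int) : List Int → Option Bool
  | [] => none
  | i :: rest =>
    if PySem.List.count t i = 3 then
      if s - 3 * i = 5 ∨ s - 3 * i ≥ 14 then some true
      else
        match aInner t (PySem.List.pyRange (i + 1) 7) with
        | some b => some b
        | none => aLoop t s rest
    else if PySem.List.count t i = 4 then
      (if s = 5 * i then some true else some false)
    else if PySem.List.count t i ≥ 5 then some true
    else aLoop t s rest

def aBody (tup : List Int) : Bool :=
  let t := PySem.List.sorted tup (fun x => x) false
  let s := t.sum
  match aLoop t s (PySem.List.pyRange 1 7) with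
  | some b => b
  | none => decide (t ∈ ([[1,2,3,4,5,6],[1,1,2,2,3,3],[4,4,5,5,6,6]] : List (List Int)))

def isGoodTrio (indone : Int) (indtwo : Int) (indthree : Int) (lod : List (List Int)) : Bool :=
  match PySem.List.pyGet? lod indone, PySem.List.pyGet? lod indtwo, PySem.List.pyGet? lod indthree with
  | some r1, some r2, some r3 =>
    match PySem.List.pyGet? r1 1, PySem.List.pyGet? r1 2, PySem.List.pyGet? r2 1,
          PySem.List.pyGet? r2 2, PySem.List.pyGet? r3 1, PySem.List.pyGet? r3 2 with
    | some a1, some a2, some b1, some b2, some c1, some c2 => aBody [a1, a2, b1, b2, c1, c2]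
    | _, _, _, _, _, _ => false
  | _, _, _ => false

-- ===== PORT B =====

-- one step of Source B's run-building loop; the accumulator holds the runs in reverse,
-- so the head is Python's runs[-1]
def bStep (acc : List (Int × Int)) (x : Int) : List (Int × Int) :=
  match acc with
  | (v, k) :: rest => if v = x then (v, k + 1) :: rest else (x, 1) :: (v, k) :: rest
  | [] => [(x, 1)]

def bRuns (tup : List Int) : List (Int × Int) := (tup.foldl bStep []).reverse

def bBody (tup0 : List Int) : Bool :=
  let tup := PySem.List.sorted tup0 (fun x => x) false
  let s := tup.sum
  let runs := bRuns tup
  let big := runs.filter (fun p => decide (3 ≤ p.2) && decide (1 ≤ p.1) && decide (p.1 ≤ 6))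
  if big.length = 2 then true
  else if big.length = 1 then
    let v := (big.headD (0, 0)).1
    let k := (big.headD (0, 0)).2
    if 5 ≤ k then true
    else if k = 4 then decide (s = 5 * v)
    else decide (s - 3 * v = 5 ∨ s - 3 * v ≥ 14)
  else decide (runs ∈ ([[(1,1),(2,1),(3,1),(4,1),(5,1),(6,1)],
                        [(1,2),(2,2),(3,2)],
                        [(4,2),(5,2),(6,2)]] : List (List (Int × Int))))

def isGoodTrio_alt (indone : Int) (indtwo : Int) (indthree : Int) (lod : List (List Int)) : Bool :=
  match PySem.List.pyGet? lod indone with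
  | none => false
  | some r1 =>
    match PySem.List.pyGet? lod indtwo with
    | none => false
    | some r2 =>
      match PySem.List.pyGet? lod indthree with
      | none => false
      | some r3 =>
        match PySem.List.pyGet? r1 1 with
        | none => false
        | some a1 =>
          match PySem.List.pyGet? r1 2 with
          | none => false
          | some a2 =>
            match PySem.List.pyGet? r2 1 with
            | none => false
            | some b1 =>
              match PySem.List.pyGet? r2 2 with
              | none => false
              | some b2 =>
                match PySem.List.pyGet? r3 1 with
                | none => false
                | some c1 =>
                  match PySem.List.pyGet? r3 2 with
                  | none => false
                  | some c2 => bBody [a1, a2, b1, b2, c1, c2]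

-- ===== PRECONDITION & SPEC =====
-- Pre_ is exactly where Python A returns (no IndexError): the three row indices are in
-- range and each selected row has at least 3 entries (so row[1] / row[2] exist).
def Pre_isGoodTrio (indone : Int) (indtwo : Int) (indthree : Int) (lod : List (List Int)) : Prop :=
  PySem.Raise.InRange lod.length indone ∧ PySem.Raise.InRange lod.length indtwo ∧
  PySem.Raise.InRange lod.length indthree ∧
  3 ≤ (PySem.List.pyGetD lod indone []).length ∧ 3 ≤ (PySem.List.pyGetD lod indtwo []).length ∧
  3 ≤ (PySem.List.pyGetD lod indthree []).length

instance (indone : Int) (indtwo : Int) (indthree : Int) (lod : List (List Int)) : Decidable (Pre_isGoodTrio indone indtwo indthree lod) := by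
  unfold Pre_isGoodTrio; infer_instance

def pvWitness_isGoodTrio : Int × Int × Int × List (List Int) := (0, 0, 0, [[0, 1, 2]])

def Spec_isGoodTrio (indone : Int) (indtwo : Int) (indthree : Int) (lod : List (List Int)) (out : Bool) : Prop := out = isGoodTrio_alt indone indtwo indthree lod
instance (indone : Int) (indtwo : Int) (indthree : Int) (lod : List (List Int)) (out : Bool) : Decidable (Spec_isGoodTrio indone indtwo indthree lod out) := by unfold Spec_isGoodTrio; infer_instance

-- ===== CLAIM (what is proved, stated in full; the proofs are below) =====
def Claim_equal_isGoodTrio : Prop := ∀ (indone : Int) (indtwo : Int) (indthree : Int) (lod : List (List Int)), Dom_isGoodTrio indone indtwo indthree lod → Pre_isGoodTrio indone indtwo indthree lod → Spec_isGoodTrio indone indtwo indthree lod (isGoodTrio indone indtwo indthree lod)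

-- ===== LEMMAS AND PROOFS =====

theorem pv_pyGetD_eq_of_pyGet? {α : Type} (xs : List α) (i : Int) (d x : α)
    (h : PySem.List.pyGet? xs i = some x) : PySem.List.pyGetD xs i d = x := by
  simp [PySem.List.pyGetD, h]

theorem pv_count_pair_le (l : List Int) (a b : Int) (h : a ≠ b) :
    l.count a + l.count b ≤ l.length := by
  induction l with
  | nil => simp
  | cons x xs ih =>
    simp only [List.count_cons, List.length_cons]
    split_ifs <;> simp_all <;> omega

theorem pv_count_triple_le (l : List Int) (a b c : Int) (hab : a ≠ b) (hac : a ≠ c) (hbc : b ≠ c) :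
    l.count a + l.count b + l.count c ≤ l.length := by
  induction l with
  | nil => simp
  | cons x xs ih =>
    simp only [List.count_cons, List.length_cons]
    split_ifs <;> simp_all <;> omega

theorem pv_count_good (l : List Int) (hl : l ∈ ([[1,2,3,4,5,6],[1,1,2,2,3,3],[4,4,5,5,6,6]] : List (List Int))) (v : Int) :
    l.count v ≤ 2 := by
  simp only [List.mem_cons, List.not_mem_nil, or_false] at hl
  rcases hl with rfl | rfl | rfl <;> simp [List.count_cons] <;> split_ifs <;> omega

theorem pv_aInner_char (t : List Int) (l : List Int) :
    aInner t l = if ∃ j ∈ l, t.count j = 3 then some true else none := by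
  induction l with
  | nil => simp [aInner]
  | cons j rest ih =>
    simp only [aInner, PySem.List.count_eq, ih]
    by_cases hj : t.count j = 3
    · simp [hj]
    · simp only [if_neg hj]
      by_cases hE : ∃ x ∈ rest, t.count x = 3
      · obtain ⟨x, hx, h3x⟩ := hE
        rw [if_pos ⟨x, hx, h3x⟩, if_pos ⟨x, List.mem_cons_of_mem _ hx, h3x⟩]
      · rw [if_neg hE, if_neg ?_]
        rintro ⟨x, hx, h3x⟩
        rcases List.mem_cons.mp hx with rfl | hx'
        · exact hj h3x
        · exact hE ⟨x, hx', h3x⟩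

theorem pv_aLoop_char (t : List Int) (s : Int) (h6 : t.length = 6) :
    ∀ (n : Nat), n ≤ 6 → ∀ a : Int, a = 7 - n →
    aLoop t s (PySem.List.pyRange a 7) =
      match (PySem.List.pyRange a 7).filter (fun v => decide (3 ≤ t.count v)) with
      | [] => none
      | [v] =>
        if 5 ≤ t.count v then some true
        else if t.count v = 4 then some (decide (s = 5 * v))
        else if s - 3 * v = 5 ∨ s - 3 * v ≥ 14 then some true else none
      | _ :: _ :: _ => some true := by
  intro n
  induction n with
  | zero =>
    intro _ a ha
    subst ha
    simp only [Nat.cast_zero, sub_zero]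
    rw [show PySem.List.pyRange (7 : Int) 7 = [] from by decide]
    simp [aLoop]
  | succ m ih =>
    intro hn a ha
    have hR := ih (by omega) (a + 1) (by push_cast at ha ⊢; omega)
    have hlt : a < 7 := by push_cast at ha; omega
    rw [PySem.List.pyRange_one_cons hlt]
    simp only [aLoop, PySem.List.count_eq]
    by_cases h3 : 3 ≤ t.count a
    · by_cases h5 : 5 ≤ t.count a
      · rw [if_neg (by omega), if_neg (by omega), if_pos h5,
            List.filter_cons_of_pos (by simpa using h3)]
        cases hFR : (PySem.List.pyRange (a + 1) 7).filter (fun v => decide (3 ≤ t.count v)) with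
        | nil => simp [h5]
        | cons w ws => rfl
      · by_cases h4 : t.count a = 4
        · rw [if_neg (by omega), if_pos h4]
          have hFR : (PySem.List.pyRange (a + 1) 7).filter (fun v => decide (3 ≤ t.count v)) = [] := by
            rw [List.filter_eq_nil_iff]
            intro w hw
            have hwm := PySem.List.mem_pyRange_one.mp hw
            have hp := pv_count_pair_le t a w (by omega)
            simp only [decide_eq_true_eq]
            omega
          rw [List.filter_cons_of_pos (by simpa using h3), hFR]
          by_cases hs : s = 5 * a
          · simp [h4, hs]
          · simp [h4, hs]
        · have h3e : t.count a = 3 := by omega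
          rw [if_pos h3e]
          by_cases hs : s - 3 * a = 5 ∨ s - 3 * a ≥ 14
          · rw [if_pos hs, List.filter_cons_of_pos (by simpa using h3)]
            cases hFR : (PySem.List.pyRange (a + 1) 7).filter (fun v => decide (3 ≤ t.count v)) with
            | nil => simp [h3e, hs]
            | cons w ws => rfl
          · rw [if_neg hs, pv_aInner_char]
            by_cases hE : ∃ j ∈ PySem.List.pyRange (a + 1) 7, t.count j = 3
            · rw [if_pos hE, List.filter_cons_of_pos (by simpa using h3)]
              obtain ⟨j, hj, hj3⟩ := hE
              have hmemF : j ∈ (PySem.List.pyRange (a + 1) 7).filter (fun v => decide (3 ≤ t.count v)) :=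
                List.mem_filter.mpr ⟨hj, by simp [hj3]⟩
              cases hFR : (PySem.List.pyRange (a + 1) 7).filter (fun v => decide (3 ≤ t.count v)) with
              | nil => rw [hFR] at hmemF; simp at hmemF
              | cons w ws => rfl
            · rw [if_neg hE, List.filter_cons_of_pos (by simpa using h3)]
              have hFR : (PySem.List.pyRange (a + 1) 7).filter (fun v => decide (3 ≤ t.count v)) = [] := by
                rw [List.filter_eq_nil_iff]
                intro w hw
                have hwm := PySem.List.mem_pyRange_one.mp hw
                have hp := pv_count_pair_le t a w (by omega)
                simp only [decide_eq_true_eq]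
                intro h3w
                exact hE ⟨w, hw, by omega⟩
              rw [hFR] at hR ⊢
              rw [hR]
              simp [h3e, hs]
    · rw [if_neg (by omega), if_neg (by omega), if_neg (by omega),
          List.filter_cons_of_neg (by simpa using h3)]
      exact hR

-- RLE decoding: a run list back to the flat list
def rleDecode : List (Int × Int) → List Int
  | [] => []
  | (v, k) :: rest => List.replicate k.toNat v ++ rleDecode rest

theorem rleDecode_append (a b : List (Int × Int)) :
    rleDecode (a ++ b) = rleDecode a ++ rleDecode b := by
  induction a with
  | nil => simp [rleDecode]
  | cons p rest ih => cases p; simp [rleDecode, ih, List.append_assoc]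

-- the fold is a lossless encoder: decoding the (reversed) accumulator recovers the input
theorem pv_bStep_decode : ∀ (l : List Int) (acc : List (Int × Int)),
    (∀ p ∈ acc, 1 ≤ p.2) →
    rleDecode (l.foldl bStep acc).reverse = rleDecode acc.reverse ++ l ∧
      (∀ p ∈ l.foldl bStep acc, 1 ≤ p.2) := by
  intro l
  induction l with
  | nil => intro acc h; exact ⟨by simp, h⟩
  | cons x l' ih =>
    intro acc hpos
    simp only [List.foldl_cons]
    have hstep : rleDecode (bStep acc x).reverse = rleDecode acc.reverse ++ [x] ∧
        (∀ p ∈ bStep acc x, 1 ≤ p.2) := by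
      match acc with
      | [] => exact ⟨by simp [bStep, rleDecode], by simp [bStep]⟩
      | (v, k) :: rest =>
        have hk : 1 ≤ k := hpos (v, k) List.mem_cons_self
        by_cases hvx : v = x
        · subst hvx
          have hb : bStep ((v, k) :: rest) v = (v, k + 1) :: rest := by
            simp [bStep]
          have htn : (k + 1).toNat = k.toNat + 1 := by omega
          refine ⟨?_, ?_⟩
          · rw [hb, List.reverse_cons, List.reverse_cons, rleDecode_append,
              rleDecode_append]
            simp [rleDecode, htn, List.replicate_succ', List.append_assoc]
          · intro p hp
            rw [hb] at hp
            rcases List.mem_cons.mp hp with rfl | hp'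
            · simp; omega
            · exact hpos p (List.mem_cons_of_mem _ hp')
        · have hb : bStep ((v, k) :: rest) x = (x, 1) :: (v, k) :: rest := by
            simp [bStep, hvx]
          refine ⟨?_, ?_⟩
          · rw [hb, List.reverse_cons, rleDecode_append]
            simp [rleDecode]
          · intro p hp
            rw [hb] at hp
            rcases List.mem_cons.mp hp with rfl | hp'
            · simp
            · exact hpos p hp'
    obtain ⟨hd, hp⟩ := hstep
    obtain ⟨ih1, ih2⟩ := ih (bStep acc x) hp
    refine ⟨?_, ih2⟩
    rw [ih1, hd, List.append_assoc]
    simp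

theorem pv_bRuns_decode (t : List Int) : rleDecode (bRuns t) = t := by
  have := pv_bStep_decode t [] (by simp)
  simpa [bRuns, rleDecode] using this.1

theorem pv_bRuns_pos (t : List Int) : ∀ p ∈ bRuns t, 1 ≤ p.2 := by
  have := (pv_bStep_decode t [] (by simp)).2
  intro p hp
  exact this p (List.mem_reverse.mp hp)

-- on a sorted input the run keys are pairwise distinct (strictly decreasing in the
-- reversed accumulator)
theorem pv_bStep_keys : ∀ (l : List Int) (acc : List (Int × Int)),
    l.Pairwise (· ≤ ·) → (acc.map Prod.fst).Pairwise (· > ·) →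
    (∀ p ∈ acc.head?, ∀ x ∈ l, p.1 ≤ x) →
    ((l.foldl bStep acc).map Prod.fst).Pairwise (· > ·) := by
  intro l
  induction l with
  | nil => intro acc _ h _; simpa using h
  | cons x l' ih =>
    intro acc hch hacc hhd
    simp only [List.foldl_cons]
    obtain ⟨hxle, hch'⟩ := List.pairwise_cons.mp hch
    apply ih _ hch'
    · match acc with
      | [] =>
        simp [bStep]
      | (v, k) :: rest =>
        have hvx : v ≤ x := hhd (v, k) rfl x List.mem_cons_self
        by_cases he : v = x
        · have hb : bStep ((v, k) :: rest) x = (v, k + 1) :: rest := by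
            simp [bStep, he]
          rw [hb]
          simpa using hacc
        · have hb : bStep ((v, k) :: rest) x = (x, 1) :: (v, k) :: rest := by
            simp [bStep, he]
          rw [hb]
          simp only [List.map_cons] at hacc ⊢
          refine List.pairwise_cons.mpr ⟨?_, hacc⟩
          intro u hu
          have hxv : v < x := lt_of_le_of_ne hvx he
          rcases List.mem_cons.mp hu with rfl | hu'
          · exact hxv
          · obtain ⟨hvgt, -⟩ := List.pairwise_cons.mp hacc
            exact lt_trans (hvgt u hu') hxv
    · match acc with
      | [] =>
        intro p hp y hy
        simp only [bStep, List.head?_cons, Option.mem_some_iff] at hp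
        subst hp
        exact hxle y hy
      | (v, k) :: rest =>
        intro p hp y hy
        by_cases he : v = x
        · have hb : bStep ((v, k) :: rest) x = (v, k + 1) :: rest := by
            simp [bStep, he]
          rw [hb] at hp
          simp only [List.head?_cons, Option.mem_some_iff] at hp
          subst hp
          exact he ▸ hhd (v, k) rfl y (List.mem_cons_of_mem _ hy)
        · have hb : bStep ((v, k) :: rest) x = (x, 1) :: (v, k) :: rest := by
            simp [bStep, he]
          rw [hb] at hp
          simp only [List.head?_cons, Option.mem_some_iff] at hp
          subst hp
          exact hxle y hy

theorem pv_bRuns_keys_nodup (t : List Int) (hs : t.Pairwise (· ≤ ·)) :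
    ((bRuns t).map Prod.fst).Nodup := by
  have h := pv_bStep_keys t [] hs (by simp) (by simp)
  have he : ((bRuns t).map Prod.fst) = ((t.foldl bStep []).map Prod.fst).reverse := by
    simp [bRuns]
  rw [he]
  have hne := (List.Pairwise.imp (fun hgt => ne_of_lt hgt) h).reverse
  simpa [List.Nodup, flip] using hne

theorem pv_key_of_mem_rleDecode (R : List (Int × Int)) (v : Int) (hv : v ∈ rleDecode R) :
    v ∈ R.map Prod.fst := by
  induction R with
  | nil => simp [rleDecode] at hv
  | cons q qs ihq =>
    obtain ⟨a, b⟩ := q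
    simp only [rleDecode, List.mem_append] at hv
    rcases hv with hv | hv
    · simp [List.eq_of_mem_replicate hv]
    · simp only [List.map_cons, List.mem_cons]
      exact Or.inr (ihq hv)

theorem pv_count_rleDecode (R : List (Int × Int)) (hnd : (R.map Prod.fst).Nodup)
    (v : Int) (k : Int) (hm : (v, k) ∈ R) : (rleDecode R).count v = k.toNat := by
  induction R with
  | nil => simp at hm
  | cons p rest ih =>
    obtain ⟨w, j⟩ := p
    simp only [List.map_cons, List.nodup_cons] at hnd
    rcases List.mem_cons.mp hm with h | h
    · obtain ⟨rfl, rfl⟩ := Prod.mk.inj h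
      have hc : (rleDecode rest).count v = 0 := by
        rw [List.count_eq_zero]
        intro hv
        exact hnd.1 (pv_key_of_mem_rleDecode rest v hv)
      simp [rleDecode, List.count_append, hc]
    · have hvw : v ≠ w := by
        rintro rfl
        exact hnd.1 (List.mem_map.mpr ⟨(v, k), h, rfl⟩)
      simp [rleDecode, List.count_append, List.count_replicate, if_neg hvw.symm,
        ih hnd.2 h]

theorem pv_mem_rleDecode (R : List (Int × Int)) (hpos : ∀ p ∈ R, 1 ≤ p.2) (v : Int) :
    v ∈ rleDecode R ↔ ∃ k, (v, k) ∈ R := by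
  induction R with
  | nil => simp [rleDecode]
  | cons p rest ih =>
    obtain ⟨w, j⟩ := p
    have hj : 1 ≤ j := hpos (w, j) List.mem_cons_self
    have ih' := ih (fun q hq => hpos q (List.mem_cons_of_mem _ hq))
    simp only [rleDecode, List.mem_append, List.mem_replicate, List.mem_cons, ih']
    constructor
    · rintro (⟨-, rfl⟩ | ⟨k, hk⟩)
      · exact ⟨j, Or.inl rfl⟩
      · exact ⟨k, Or.inr hk⟩
    · rintro ⟨k, hk | hk⟩
      · obtain ⟨rfl, rfl⟩ := Prod.mk.inj hk
        exact Or.inl ⟨by omega, rfl⟩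
      · exact Or.inr ⟨k, hk⟩

-- the run list of a sorted list is exactly { (v, count v) : v ∈ t }
theorem pv_mem_bRuns (t : List Int) (hs : t.Pairwise (· ≤ ·)) (v : Int) (k : Int) :
    (v, k) ∈ bRuns t ↔ v ∈ t ∧ k = (t.count v : Int) := by
  have hnd := pv_bRuns_keys_nodup t hs
  have hdec := pv_bRuns_decode t
  have hpos := pv_bRuns_pos t
  constructor
  · intro hm
    have h1 : v ∈ t := by
      rw [← hdec]
      exact (pv_mem_rleDecode _ hpos v).mpr ⟨k, hm⟩
    have h2 := pv_count_rleDecode _ hnd v k hm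
    rw [hdec] at h2
    have hk1 : 1 ≤ k := hpos (v, k) hm
    exact ⟨h1, by omega⟩
  · rintro ⟨hv, rfl⟩
    rw [← hdec] at hv
    obtain ⟨k', hk'⟩ := (pv_mem_rleDecode _ hpos v).mp hv
    have h2 := pv_count_rleDecode _ hnd v k' hk'
    rw [hdec] at h2
    have hk1 : 1 ≤ k' := hpos (v, k') hk'
    have : k' = (t.count v : Int) := by omega
    exact this ▸ hk'

theorem pv_bRuns_eq_iff (t : List Int) (R : List (Int × Int)) (hR : bRuns (rleDecode R) = R) :
    bRuns t = R ↔ t = rleDecode R := by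
  constructor
  · intro h; rw [← pv_bRuns_decode t, h]
  · rintro rfl; exact hR

-- the core equality of the two bodies on six pips
theorem pv_body_eq (tup : List Int) (h6 : tup.length = 6) : aBody tup = bBody tup := by
  have hperm := PySem.List.sorted_perm tup (fun x => x) false
  have hsorted : (PySem.List.sorted tup (fun x => x) false).Pairwise (· ≤ ·) :=
    PySem.List.sorted_pairwise tup (fun x => x)
  have hlen : (PySem.List.sorted tup (fun x => x) false).length = 6 := by
    rw [hperm.length_eq, h6]
  simp only [aBody, bBody]
  rw [pv_aLoop_char _ _ hlen 6 (by norm_num) 1 (by norm_num)]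
  rw [show PySem.List.pyRange 1 7 = ([1,2,3,4,5,6] : List Int) from by decide]
  set t := PySem.List.sorted tup (fun x => x) false with ht
  set p := fun q : Int × Int => decide (3 ≤ q.2) && decide (1 ≤ q.1) && decide (q.1 ≤ 6) with hp
  set big := (bRuns t).filter p with hbig
  have hmem : ∀ q : Int × Int, q ∈ big ↔
      q.1 ∈ t ∧ q.2 = (t.count q.1 : Int) ∧ 3 ≤ q.2 ∧ 1 ≤ q.1 ∧ q.1 ≤ 6 := by
    rintro ⟨v, k⟩
    rw [hbig, List.mem_filter, pv_mem_bRuns t hsorted, hp]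
    simp only [decide_eq_true_eq, Bool.and_eq_true]
    tauto
  have hbignd : (big.map Prod.fst).Nodup :=
    (pv_bRuns_keys_nodup t hsorted).sublist (List.Sublist.map Prod.fst List.filter_sublist)
  -- big's keys are a permutation of the filtered base list
  have hpermF : (big.map Prod.fst).Perm
      (([1,2,3,4,5,6] : List Int).filter (fun v => decide (3 ≤ t.count v))) := by
    apply (List.perm_ext_iff_of_nodup hbignd ((by decide : (([1,2,3,4,5,6] : List Int)).Nodup).filter _)).mpr
    intro u
    simp only [List.mem_filter, List.mem_map]
    constructor
    · rintro ⟨⟨v, k⟩, hq, hu⟩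
      obtain ⟨hvt, hkc, h3, h1, h6'⟩ := (hmem _).mp hq
      simp only at hvt hkc h3 h1 h6' hu
      subst hu
      have h3' : 3 ≤ (t.count v : Int) := hkc ▸ h3
      refine ⟨by simp only [List.mem_cons, List.not_mem_nil, or_false]; omega, ?_⟩
      simp only [decide_eq_true_eq]
      exact_mod_cast h3'
    · rintro ⟨hub, hcu⟩
      simp only [decide_eq_true_eq] at hcu
      have h16 : 1 ≤ u ∧ u ≤ 6 := by
        simp only [List.mem_cons, List.not_mem_nil, or_false] at hub; omega
      have hut : u ∈ t := List.count_pos_iff.mp (by omega)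
      exact ⟨(u, (t.count u : Int)), (hmem _).mpr ⟨hut, rfl, by simpa using (by exact_mod_cast hcu : (3:Int) ≤ (t.count u : Int)), h16.1, h16.2⟩, rfl⟩
  have hblen : big.length =
      (([1,2,3,4,5,6] : List Int).filter (fun v => decide (3 ≤ t.count v))).length := by
    rw [← hpermF.length_eq, List.length_map]
  rcases hF : ([1,2,3,4,5,6] : List Int).filter (fun v => decide (3 ≤ t.count v))
    with _ | ⟨v, _ | ⟨w, rest⟩⟩
  · -- no big run: fallback on both sides
    rw [hF] at hblen
    simp only [List.length_nil] at hblen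
    rw [if_neg (by omega), if_neg (by omega)]
    have e1 : bRuns t = ([(1,1),(2,1),(3,1),(4,1),(5,1),(6,1)] : List (Int × Int)) ↔
        t = ([1,2,3,4,5,6] : List Int) := pv_bRuns_eq_iff t _ (by decide)
    have e2 : bRuns t = ([(1,2),(2,2),(3,2)] : List (Int × Int)) ↔
        t = ([1,1,2,2,3,3] : List Int) := pv_bRuns_eq_iff t _ (by decide)
    have e3 : bRuns t = ([(4,2),(5,2),(6,2)] : List (Int × Int)) ↔
        t = ([4,4,5,5,6,6] : List Int) := pv_bRuns_eq_iff t _ (by decide)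
    simp only [List.mem_cons, List.not_mem_nil, or_false, e1, e2, e3]
  · -- exactly one big run (v, count v)
    rw [hF] at hblen
    simp only [List.length_singleton] at hblen
    have hvF : v ∈ ([1,2,3,4,5,6] : List Int).filter (fun u => decide (3 ≤ t.count u)) := by
      rw [hF]; exact List.mem_singleton.mpr rfl
    obtain ⟨hvb, hv3d⟩ := List.mem_filter.mp hvF
    have hv3 : 3 ≤ t.count v := by simpa using hv3d
    have hbv : big = [(v, (t.count v : Int))] := by
      obtain ⟨q, hq⟩ := List.length_eq_one_iff.mp hblen
      obtain ⟨hqt, hqc, -, -, -⟩ := (hmem q).mp (hq ▸ List.mem_singleton.mpr rfl)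
      have hqm : q.1 ∈ big.map Prod.fst :=
        List.mem_map.mpr ⟨q, hq ▸ List.mem_singleton.mpr rfl, rfl⟩
      have hfq := hpermF.mem_iff.mp hqm
      rw [hF] at hfq
      have hq1 : q.1 = v := by simpa using hfq
      rw [hq]
      have : q = (v, (t.count v : Int)) := by
        rw [← hq1]
        exact Prod.ext rfl (by rw [hqc, hq1])
      rw [this]
    rw [hbv]
    by_cases h5 : 5 ≤ t.count v
    · have h5' : (5 : Int) ≤ (t.count v : Int) := by exact_mod_cast h5
      simp [h5, h5']
    · have h5' : ¬ (5 : Int) ≤ (t.count v : Int) := by exact_mod_cast h5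
      by_cases h4 : t.count v = 4
      · have h4' : ((t.count v : Int)) = 4 := by exact_mod_cast h4
        simp [h5, h5', h4, h4']
      · have h4' : ¬ ((t.count v : Int)) = 4 := fun h => h4 (by exact_mod_cast h)
        by_cases hs : t.sum - 3 * v = 5 ∨ t.sum - 3 * v ≥ 14
        · simp [h5, h5', h4, h4', hs]
        · have hmemb : ¬ (t ∈ ([[1,2,3,4,5,6],[1,1,2,2,3,3],[4,4,5,5,6,6]] : List (List Int))) := by
            intro hmem'
            have hle := pv_count_good _ hmem' v
            omega
          simp [h5, h5', h4, h4', hs, hmemb]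
  · -- two big runs: both sides true
    rw [hF] at hblen
    have hndF := (by decide : (([1,2,3,4,5,6] : List Int)).Nodup).filter
      (fun u => decide (3 ≤ t.count u))
    rw [hF] at hndF
    obtain ⟨hvni, hnd2⟩ := List.nodup_cons.mp hndF
    obtain ⟨hwni, -⟩ := List.nodup_cons.mp hnd2
    have hvw : v ≠ w := fun h => hvni (h ▸ List.mem_cons_self)
    have hrest : rest = [] := by
      cases rest with
      | nil => rfl
      | cons u us =>
        exfalso
        have hvm : v ∈ ([1,2,3,4,5,6] : List Int).filter (fun u => decide (3 ≤ t.count u)) := by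
          rw [hF]; exact List.mem_cons_self
        have hwm : w ∈ ([1,2,3,4,5,6] : List Int).filter (fun u => decide (3 ≤ t.count u)) := by
          rw [hF]; exact List.mem_cons_of_mem _ List.mem_cons_self
        have hum : u ∈ ([1,2,3,4,5,6] : List Int).filter (fun u => decide (3 ≤ t.count u)) := by
          rw [hF]; exact List.mem_cons_of_mem _ (List.mem_cons_of_mem _ List.mem_cons_self)
        have hv3' : 3 ≤ t.count v := by simpa using (List.mem_filter.mp hvm).2
        have hw3' : 3 ≤ t.count w := by simpa using (List.mem_filter.mp hwm).2
        have hu3' : 3 ≤ t.count u := by simpa using (List.mem_filter.mp hum).2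
        have huv : u ≠ v := fun h => hvni (h ▸ List.mem_cons_of_mem _ List.mem_cons_self)
        have huw : u ≠ w := fun h => hwni (h ▸ List.mem_cons_self)
        have := pv_count_triple_le t u v w huv huw hvw
        omega
    subst hrest
    have h2 : big.length = 2 := by simpa using hblen
    simp [h2]

-- ===== VERDICT (by name: the statement is the Claim_ definition above) =====
theorem isGoodTrio_spec : Claim_equal_isGoodTrio := by
  intro indone indtwo indthree lod _hdom hpre
  obtain ⟨hi1, hi2, hi3, hl1, hl2, hl3⟩ := hpre
  unfold Spec_isGoodTrio isGoodTrio isGoodTrio_alt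
  cases h1 : PySem.List.pyGet? lod indone with
  | none => exact absurd hi1 ((PySem.List.pyGet?_eq_none_iff _ _).mp h1)
  | some r1 =>
  cases h2 : PySem.List.pyGet? lod indtwo with
  | none => exact absurd hi2 ((PySem.List.pyGet?_eq_none_iff _ _).mp h2)
  | some r2 =>
  cases h3 : PySem.List.pyGet? lod indthree with
  | none => exact absurd hi3 ((PySem.List.pyGet?_eq_none_iff _ _).mp h3)
  | some r3 =>
  rw [pv_pyGetD_eq_of_pyGet? _ _ _ _ h1] at hl1
  rw [pv_pyGetD_eq_of_pyGet? _ _ _ _ h2] at hl2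
  rw [pv_pyGetD_eq_of_pyGet? _ _ _ _ h3] at hl3
  have g11 : ∃ x, PySem.List.pyGet? r1 1 = some x := by
    cases h : PySem.List.pyGet? r1 1 with
    | none =>
      have := (PySem.List.pyGet?_eq_none_iff _ _).mp h
      simp [PySem.Raise.InRange] at this; omega
    | some x => exact ⟨x, rfl⟩
  have g12 : ∃ x, PySem.List.pyGet? r1 2 = some x := by
    cases h : PySem.List.pyGet? r1 2 with
    | none =>
      have := (PySem.List.pyGet?_eq_none_iff _ _).mp h
      simp [PySem.Raise.InRange] at this; omega
    | some x => exact ⟨x, rfl⟩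
  have g21 : ∃ x, PySem.List.pyGet? r2 1 = some x := by
    cases h : PySem.List.pyGet? r2 1 with
    | none =>
      have := (PySem.List.pyGet?_eq_none_iff _ _).mp h
      simp [PySem.Raise.InRange] at this; omega
    | some x => exact ⟨x, rfl⟩
  have g22 : ∃ x, PySem.List.pyGet? r2 2 = some x := by
    cases h : PySem.List.pyGet? r2 2 with
    | none =>
      have := (PySem.List.pyGet?_eq_none_iff _ _).mp h
      simp [PySem.Raise.InRange] at this; omega
    | some x => exact ⟨x, rfl⟩
  have g31 : ∃ x, PySem.List.pyGet? r3 1 = some x := by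
    cases h : PySem.List.pyGet? r3 1 with
    | none =>
      have := (PySem.List.pyGet?_eq_none_iff _ _).mp h
      simp [PySem.Raise.InRange] at this; omega
    | some x => exact ⟨x, rfl⟩
  have g32 : ∃ x, PySem.List.pyGet? r3 2 = some x := by
    cases h : PySem.List.pyGet? r3 2 with
    | none =>
      have := (PySem.List.pyGet?_eq_none_iff _ _).mp h
      simp [PySem.Raise.InRange] at this; omega
    | some x => exact ⟨x, rfl⟩
  obtain ⟨a1, e11⟩ := g11; obtain ⟨a2, e12⟩ := g12
  obtain ⟨b1, e21⟩ := g21; obtain ⟨b2, e22⟩ := g22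
  obtain ⟨c1, e31⟩ := g31; obtain ⟨c2, e32⟩ := g32
  simp only [e11, e12, e21, e22, e31, e32]
  exact pv_body_eq _ rfl
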